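-- pv_equiv track=rewrite | github.com/pypi-data/pypi-mirror-389 | packages/omniverse-asset-validator/omniverse_asset_validator-1.4.2-py3-none-any.whl/omni/asset_validator/_expression.py | normalize_regex
-- ===== SOURCE A (Python) =====
-- import itertools
--
-- WILDCARD: str = r".*"
--
-- def normalize_regex(tokens: list[str]) -> str:
--     """
--     Attempts to normalize a regex. We generate only wildcards, as such, things like: `This is an .*.* example` should
--     be written as `This is an .* example` instead.
--
--     Args:
--         tokens: The list of tokens.
--
--     Returns:
--         The normalized pattern as string.
--     """
--     flag: bool = True
--     while flag:
--         flag = False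
--         reduced_tokens: list[str] = []
--         # Remove consecutive wildcards
--         for key, group in itertools.groupby(tokens):
--             if key == WILDCARD:
--                 reduced_tokens.append(key)
--             else:
--                 reduced_tokens.extend(group)
--         # Introduce more wildcards
--         tokens = reduced_tokens
--         for i in range(len(tokens) - 2):
--             if tokens[i] == WILDCARD and tokens[i + 1].isspace() and tokens[i + 2] == WILDCARD:
--                 tokens[i + 1] = WILDCARD
--                 flag = True
--     return "".join(tokens)
-- ===== SOURCE B (Python) =====
-- WILDCARD: str = r".*"
--
-- def normalize_regex(tokens: list[str]) -> str:
--     """Single forward pass with a stack: drop a wildcard after a wildcard, and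
--     merge wildcard-space-wildcard by popping the space, instead of A's
--     collapse/rescan fixed-point loop."""
--     out: list[str] = []
--     for tok in tokens:
--         if tok == WILDCARD:
--             if out and out[-1] == WILDCARD:
--                 continue
--             if len(out) >= 2 and out[-1].isspace() and out[-2] == WILDCARD:
--                 out.pop()
--                 continue
--         out.append(tok)
--     return "".join(out)
-- ===== Notes on version B (the rewrite author's own statement) =====
-- stated objective: alternative
-- what changed: Replaces A's while-flag fixed-point loop (a groupby collapse pass plus an in-place index rescan per iteration) with a single forward pass over the tokens using a stack that drops a wildcard pushed onto a wildcard and pops a whitespace token sitting between two wildcards.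
import Mathlib
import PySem

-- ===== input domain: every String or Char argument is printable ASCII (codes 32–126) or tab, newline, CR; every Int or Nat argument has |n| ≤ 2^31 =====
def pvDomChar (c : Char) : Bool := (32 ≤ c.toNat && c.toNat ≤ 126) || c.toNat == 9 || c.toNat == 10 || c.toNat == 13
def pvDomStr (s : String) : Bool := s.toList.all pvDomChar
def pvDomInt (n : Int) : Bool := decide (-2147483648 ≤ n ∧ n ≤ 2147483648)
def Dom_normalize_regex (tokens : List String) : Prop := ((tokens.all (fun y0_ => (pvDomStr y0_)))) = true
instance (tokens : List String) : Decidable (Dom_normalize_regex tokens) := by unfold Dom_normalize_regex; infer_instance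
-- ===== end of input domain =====

-- B replaces A's collapse-and-rescan fixed-point loop by a single forward pass with a stack
-- (an alternative algorithm of the same cost; return values proved equal on all inputs).

-- ===== PORT A =====
-- A's module constant WILDCARD = ".*"
def Wtok : String := ".*"

-- Python str.isspace()
def pvIsSpace (s : String) : Bool := PySem.Str.strIsspace s

-- itertools.groupby pass: one wildcard per run of wildcards, other runs copied whole
def pvCollapse : List String → List String
  | [] => []
  | a :: r =>
    (if a = Wtok then [a] else a :: r.takeWhile (· == a)) ++ pvCollapse (r.dropWhile (· == a))
termination_by t => t.length
decreasing_by
  simp only [List.length_cons]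
  have := List.length_dropWhile_le (fun x => x == a) r
  omega

-- the condition tokens[i] == WILDCARD and tokens[i+1].isspace() and tokens[i+2] == WILDCARD
-- (indices produced by range(len-2) are always in range, so getD is exact)
def pvCond (t : List String) (i : Nat) : Bool :=
  (t.getD i "" == Wtok) && pvIsSpace (t.getD (i + 1) "") && (t.getD (i + 2) "" == Wtok)

-- the in-place `for i in range(len(tokens) - 2)` pass; k counts remaining indices
def pvRepGo : List String → Nat → Nat → Bool → List String × Bool
  | t, _, 0, fl => (t, fl)
  | t, i, k + 1, fl =>
    if pvCond t i then pvRepGo (t.set (i + 1) Wtok) (i + 1) k true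
    else pvRepGo t (i + 1) k fl

-- ---- lemmas cited by pvLoop's termination proof ----
def pvHasWW : List String → Bool
  | a :: b :: r => ((a == Wtok) && (b == Wtok)) || pvHasWW (b :: r)
  | _ => false

theorem pvHasWW_cons (a : String) (l : List String) :
    pvHasWW (a :: l) = (((a == Wtok) && (l.headD "" == Wtok)) || pvHasWW l) := by
  cases l <;> simp [pvHasWW, Wtok]

theorem pvGetD_W_lt (t : List String) (j : Nat) (h : t.getD j "" = Wtok) : j < t.length := by
  by_contra hj
  rw [List.getD_eq_default _ _ (not_lt.mp hj)] at h
  simp [Wtok] at h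

theorem pvHasWW_set (t : List String) (i : Nat) (h1 : t.getD i "" = Wtok)
    (h2 : i + 1 < t.length) : pvHasWW (t.set (i + 1) Wtok) = true := by
  induction t generalizing i with
  | nil => simp at h2
  | cons a r ih =>
    cases i with
    | zero =>
      cases r with
      | nil => simp at h2
      | cons b r' =>
        simp only [List.getD_cons_zero] at h1
        show pvHasWW (a :: Wtok :: r') = true
        simp [pvHasWW, h1]
    | succ j =>
      simp only [List.getD_cons_succ] at h1
      have hr : pvHasWW (r.set (j + 1) Wtok) = true :=
        ih j h1 (by simp only [List.length_cons] at h2; omega)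
      show pvHasWW (a :: r.set (j + 1) Wtok) = true
      rw [pvHasWW_cons]
      simp [hr]

theorem pvRepGo_length : ∀ (k : Nat) (t : List String) (i : Nat) (fl : Bool),
    (pvRepGo t i k fl).1.length = t.length := by
  intro k
  induction k with
  | zero => intro t i fl; rfl
  | succ k ih =>
    intro t i fl
    by_cases h : pvCond t i = true
    · simp only [pvRepGo, if_pos h]
      rw [ih, List.length_set]
    · simp only [pvRepGo, if_neg h]
      exact ih _ _ _

theorem pvRepGo_hasWW : ∀ (k : Nat) (t : List String) (i : Nat) (fl : Bool),
    (fl = true → pvHasWW t = true) → (pvRepGo t i k fl).2 = true →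
    pvHasWW (pvRepGo t i k fl).1 = true := by
  intro k
  induction k with
  | zero => intro t i fl hf hr; exact hf hr
  | succ k ih =>
    intro t i fl hf hr
    by_cases h : pvCond t i = true
    · simp only [pvRepGo, if_pos h] at hr ⊢
      apply ih _ _ _ _ hr
      intro _
      have hcomp := h
      unfold pvCond at hcomp
      simp only [Bool.and_eq_true, beq_iff_eq] at hcomp
      have hlt : i + 2 < t.length := pvGetD_W_lt t (i + 2) hcomp.2
      exact pvHasWW_set t i hcomp.1.1 (by omega)
    · simp only [pvRepGo, if_neg h] at hr ⊢
      exact ih _ _ _ hf hr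

theorem pvCollapse_length_le : ∀ (t : List String), (pvCollapse t).length ≤ t.length := by
  intro t
  induction t using pvCollapse.induct with
  | case1 => simp [pvCollapse]
  | case2 a r ih =>
    rw [pvCollapse, List.length_append]
    have hsplit : (r.takeWhile (· == a)).length + (r.dropWhile (· == a)).length = r.length := by
      rw [← List.length_append, List.takeWhile_append_dropWhile]
    by_cases ha : a = Wtok
    · rw [if_pos ha]
      simp only [List.length_cons, List.length_nil]
      omega
    · rw [if_neg ha]
      simp only [List.length_cons]
      omega

theorem pvHasWW_dropWhile (a : String) (ha : a ≠ Wtok) : ∀ (l : List String),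
    pvHasWW l = true → pvHasWW (l.dropWhile (· == a)) = true := by
  intro l
  induction l with
  | nil => intro h; simp [pvHasWW] at h
  | cons x xs ih =>
    intro h
    rw [List.dropWhile_cons]
    by_cases hx : (x == a) = true
    · rw [if_pos hx]
      apply ih
      rw [pvHasWW_cons] at h
      rcases Bool.or_eq_true_iff.mp h with h' | h'
      · exfalso
        have hxW : x = Wtok := by simpa using (Bool.and_eq_true_iff.mp h').1
        have hxa : x = a := by simpa using hx
        exact ha (hxa ▸ hxW)
      · exact h'
    · rw [if_neg hx]
      exact h

theorem pvCollapse_length_lt : ∀ (t : List String), pvHasWW t = true →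
    (pvCollapse t).length < t.length := by
  intro t
  induction t using pvCollapse.induct with
  | case1 => intro h; simp [pvHasWW] at h
  | case2 a r ih =>
    intro h
    rw [pvCollapse, List.length_append]
    have hsplit : (r.takeWhile (· == a)).length + (r.dropWhile (· == a)).length = r.length := by
      rw [← List.length_append, List.takeWhile_append_dropWhile]
    rw [pvHasWW_cons] at h
    by_cases ha : a = Wtok
    · subst ha
      rw [if_pos rfl]
      by_cases hb : (r.headD "" == Wtok) = true
      · cases r with
        | nil => simp [Wtok] at hb
        | cons b r' =>
          have hbW : (b == Wtok) = true := by simpa using hb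
          have htw : (List.takeWhile (· == Wtok) (b :: r')).length
              = (List.takeWhile (· == Wtok) r').length + 1 := by
            rw [List.takeWhile_cons, if_pos hbW]
            simp
          have hle := pvCollapse_length_le (List.dropWhile (· == Wtok) (b :: r'))
          simp only [List.length_cons, List.length_nil] at hsplit htw hle ⊢
          omega
      · have h' : pvHasWW r = true := by
          rcases Bool.or_eq_true_iff.mp h with h'' | h''
          · exact absurd (Bool.and_eq_true_iff.mp h'').2 hb
          · exact h''
        have hdw : List.dropWhile (· == Wtok) r = r := by
          cases r with
          | nil => rfl
          | cons b r' =>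
            rw [List.dropWhile_cons, if_neg]
            intro hc
            exact hb (by simpa using hc)
        rw [hdw] at ih ⊢
        have := ih h'
        simp only [List.length_cons, List.length_nil]
        omega
    · rw [if_neg ha]
      have h' : pvHasWW r = true := by
        rcases Bool.or_eq_true_iff.mp h with h'' | h''
        · exact absurd (by simpa using (Bool.and_eq_true_iff.mp h'').1) ha
        · exact h''
      have := ih (pvHasWW_dropWhile a ha r h')
      have hle := pvCollapse_length_le (List.dropWhile (· == a) r)
      simp only [List.length_cons]
      omega

-- the `while flag` loop: groupby-collapse, then the replacement pass, repeated until no change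
def pvLoop (t : List String) : List String :=
  if (pvRepGo (pvCollapse t) 0 ((pvCollapse t).length - 2) false).2 then
    pvLoop (pvRepGo (pvCollapse t) 0 ((pvCollapse t).length - 2) false).1
  else (pvRepGo (pvCollapse t) 0 ((pvCollapse t).length - 2) false).1
termination_by t.length + (if pvHasWW t then 0 else 1)
decreasing_by
  rename_i h
  have h1 : pvHasWW (pvRepGo (pvCollapse t) 0 ((pvCollapse t).length - 2) false).1 = true :=
    pvRepGo_hasWW _ _ _ _ (by simp) h
  have h2 := pvRepGo_length ((pvCollapse t).length - 2) (pvCollapse t) 0 false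
  have h3 := pvCollapse_length_le t
  rw [if_pos h1]
  by_cases hW : pvHasWW t = true
  · rw [if_pos hW]
    have := pvCollapse_length_lt t hW
    omega
  · rw [if_neg hW]
    omega

def normalize_regex (tokens : List String) : String :=
  PySem.Str.join "" (pvLoop tokens)

-- ===== PORT B =====
-- one forward pass with a stack; the Lean stack keeps Python's `out` REVERSED
-- (head = out[-1]), so the final join reverses it back
def pvStep (st : List String) (tok : String) : List String :=
  if tok = Wtok then
    match st with
    | [] => [tok]
    | [b] => if b = Wtok then [b] else tok :: [b]
    | b :: c :: r =>
      if b = Wtok then b :: c :: r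
      else if pvIsSpace b && (c == Wtok) then c :: r
      else tok :: b :: c :: r
  else tok :: st

def normalize_regex_alt (tokens : List String) : String :=
  PySem.Str.join "" ((tokens.foldl pvStep []).reverse)

-- ===== PRECONDITION & SPEC =====
def Spec_normalize_regex (tokens : List String) (out : String) : Prop := out = normalize_regex_alt tokens
instance (tokens : List String) (out : String) : Decidable (Spec_normalize_regex tokens out) := by unfold Spec_normalize_regex; infer_instance

-- ===== CLAIM (what is proved, stated in full; the proofs are below) =====
def Claim_equal_normalize_regex : Prop := ∀ (tokens : List String), Dom_normalize_regex tokens → Spec_normalize_regex tokens (normalize_regex tokens)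

-- ===== LEMMAS AND PROOFS =====

theorem pvHasWW_append_of_ne : ∀ (xs z : List String),
    (∀ x ∈ xs, x ≠ Wtok) → pvHasWW (xs ++ z) = pvHasWW z := by
  intro xs
  induction xs with
  | nil => intro z _; rfl
  | cons x xs ih =>
    intro z hx
    rw [List.cons_append, pvHasWW_cons]
    have hxW : (x == Wtok) = false := by
      simp only [beq_eq_false_iff_ne]; exact hx x (by simp)
    simp [hxW, ih z (fun y hy => hx y (by simp [hy]))]

theorem pvSpace_ne_W (s : String) (h : pvIsSpace s = true) : s ≠ Wtok := by
  intro he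
  rw [he] at h
  exact absurd h (by decide)

-- pvStep applied to a wildcard always leaves a wildcard on top of the stack
theorem pvStep_head (st : List String) : (pvStep st Wtok).headD "" = Wtok := by
  rcases st with _ | ⟨b, _ | ⟨c, r⟩⟩
  · simp [pvStep]
  · by_cases hb : b = Wtok <;> simp [pvStep, hb]
  · by_cases hb : b = Wtok
    · simp [pvStep, hb]
    · by_cases hc : (pvIsSpace b && (c == Wtok)) = true
      · have hcW : c = Wtok := by simpa using (Bool.and_eq_true_iff.mp hc).2
        have hsp : pvIsSpace b = true := (Bool.and_eq_true_iff.mp hc).1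
        simp [pvStep, hb, hsp, hcW]
      · simp [pvStep, hb, hc]

theorem pvStep_W_of_head (st : List String) (h : st.headD "" = Wtok) : pvStep st Wtok = st := by
  rcases st with _ | ⟨b, _ | ⟨c, r⟩⟩
  · simp [Wtok] at h
  · simp only [List.headD_cons] at h
    simp [pvStep, h]
  · simp only [List.headD_cons] at h
    simp [pvStep, h]

theorem pvStep_W_idem (st : List String) : pvStep (pvStep st Wtok) Wtok = pvStep st Wtok :=
  pvStep_W_of_head _ (pvStep_head st)

theorem pvFoldl_run_W : ∀ (run : List String) (st : List String), (∀ x ∈ run, x = Wtok) →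
    List.foldl pvStep (pvStep st Wtok) run = pvStep st Wtok := by
  intro run
  induction run with
  | nil => intro st _; rfl
  | cons x xs ih =>
    intro st hx
    have hxW : x = Wtok := hx x (by simp)
    subst hxW
    rw [List.foldl_cons, pvStep_W_idem]
    exact ih st (fun y hy => hx y (by simp [hy]))

-- the groupby-collapse pass does not change B's result
theorem pvFoldl_collapse : ∀ (t : List String) (st : List String),
    List.foldl pvStep st (pvCollapse t) = List.foldl pvStep st t := by
  intro t
  induction t using pvCollapse.induct with
  | case1 => intro st; rw [pvCollapse]
  | case2 a r ih =>
    intro st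
    have hr : r.takeWhile (· == a) ++ r.dropWhile (· == a) = r := List.takeWhile_append_dropWhile
    rw [pvCollapse, List.foldl_append]
    by_cases ha : a = Wtok
    · subst ha
      rw [if_pos rfl]
      simp only [List.foldl_cons, List.foldl_nil]
      rw [ih]
      have hrun : ∀ x ∈ r.takeWhile (· == Wtok), x = Wtok :=
        fun x hx => by simpa using List.mem_takeWhile_imp hx
      have hW : List.foldl pvStep (pvStep st Wtok) (r.takeWhile (· == Wtok)) = pvStep st Wtok :=
        pvFoldl_run_W _ _ hrun
      conv_rhs => rw [← hr, List.foldl_append, hW]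
    · rw [if_neg ha, ih]
      conv_rhs => rw [← hr, ← List.cons_append, List.foldl_append]

-- a single tokens[i+1] = WILDCARD replacement does not change B's result
theorem pvFoldl_set : ∀ (t : List String) (i : Nat) (st : List String), pvCond t i = true →
    List.foldl pvStep st (t.set (i + 1) Wtok) = List.foldl pvStep st t := by
  intro t
  induction t with
  | nil => intro i st h; simp [pvCond, Wtok] at h
  | cons a r ih =>
    intro i st h
    cases i with
    | zero =>
      unfold pvCond at h
      simp only [Bool.and_eq_true, beq_iff_eq, List.getD_cons_zero, List.getD_cons_succ] at h
      obtain ⟨⟨ha, hsp⟩, hc⟩ := h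
      cases r with
      | nil => simp [Wtok] at hc
      | cons b r₂ =>
        simp only [List.getD_cons_zero] at hsp
        cases r₂ with
        | nil => simp [Wtok] at hc
        | cons c r₃ =>
          simp only [List.getD_cons_succ, List.getD_cons_zero] at hc
          subst ha hc
          show List.foldl pvStep st (Wtok :: Wtok :: Wtok :: r₃) =
               List.foldl pvStep st (Wtok :: b :: Wtok :: r₃)
          simp only [List.foldl_cons]
          rw [pvStep_W_idem, pvStep_W_idem]
          congr 1
          have hbW : b ≠ Wtok := pvSpace_ne_W b hsp
          have hb : pvStep (pvStep st Wtok) b = b :: pvStep st Wtok := by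
            simp [pvStep, hbW]
          rw [hb]
          obtain ⟨u, us, hu⟩ : ∃ u us, pvStep st Wtok = u :: us := by
            cases hst : pvStep st Wtok with
            | nil =>
              have := pvStep_head st
              rw [hst] at this
              exact absurd this (by simp [Wtok])
            | cons u us => exact ⟨u, us, rfl⟩
          have huW : u = Wtok := by
            have := pvStep_head st
            rw [hu] at this
            simpa using this
          rw [hu]
          subst huW
          simp [pvStep, hbW, hsp]
    | succ j =>
      have hr : pvCond r j = true := by
        unfold pvCond at h ⊢
        simpa [List.getD_cons_succ] using h
      show List.foldl pvStep st (a :: r.set (j + 1) Wtok) = List.foldl pvStep st (a :: r)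
      simp only [List.foldl_cons]
      exact ih j (pvStep st a) hr

-- the whole replacement pass does not change B's result
theorem pvFoldl_repGo : ∀ (k : Nat) (t : List String) (i : Nat) (fl : Bool) (st : List String),
    List.foldl pvStep st (pvRepGo t i k fl).1 = List.foldl pvStep st t := by
  intro k
  induction k with
  | zero => intro t i fl st; rfl
  | succ k ih =>
    intro t i fl st
    by_cases h : pvCond t i = true
    · simp only [pvRepGo, if_pos h]
      rw [ih, pvFoldl_set t i st h]
    · simp only [pvRepGo, if_neg h]
      exact ih _ _ _ _

theorem pvRepGo_flag_true : ∀ (k : Nat) (t : List String) (i : Nat),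
    (pvRepGo t i k true).2 = true := by
  intro k
  induction k with
  | zero => intro t i; rfl
  | succ k ih =>
    intro t i
    by_cases h : pvCond t i = true
    · simp only [pvRepGo, if_pos h]; exact ih _ _
    · simp only [pvRepGo, if_neg h]; exact ih _ _

theorem pvRepGo_nofire_eq : ∀ (k : Nat) (t : List String) (i : Nat),
    (pvRepGo t i k false).2 = false → (pvRepGo t i k false).1 = t := by
  intro k
  induction k with
  | zero => intro t i _; rfl
  | succ k ih =>
    intro t i h
    by_cases hc : pvCond t i = true
    · simp only [pvRepGo, if_pos hc] at h
      rw [pvRepGo_flag_true] at h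
      exact absurd h (by simp)
    · simp only [pvRepGo, if_neg hc] at h ⊢
      exact ih _ _ h

theorem pvCond_cons (a : String) (l : List String) (j : Nat) :
    pvCond (a :: l) (j + 1) = pvCond l j := by
  simp [pvCond]

theorem pvRepGo_nofire_cond : ∀ (k : Nat) (t : List String) (i : Nat),
    (pvRepGo t i k false).2 = false → ∀ d, d < k → pvCond t (i + d) = false := by
  intro k
  induction k with
  | zero => intro t i _ d hd; omega
  | succ k ih =>
    intro t i h d hd
    by_cases hc : pvCond t i = true
    · simp only [pvRepGo, if_pos hc] at h
      rw [pvRepGo_flag_true] at h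
      exact absurd h (by simp)
    · simp only [pvRepGo, if_neg hc] at h
      cases d with
      | zero =>
        have : pvCond t i = false := by
          revert hc; cases pvCond t i <;> simp
        simpa using this
      | succ d' =>
        have := ih t (i + 1) h d' (by omega)
        rwa [show i + 1 + d' = i + (d' + 1) from by omega] at this

theorem pvCond_ge (t : List String) (j : Nat) (h : t.length ≤ j + 2) : pvCond t j = false := by
  unfold pvCond
  rw [List.getD_eq_default _ _ h]
  rw [Bool.and_eq_false_iff]
  right
  decide

-- no wildcard-space-wildcard triple anywhere
def pvNoWSW : List String → Bool
  | a :: b :: c :: r => !((a == Wtok) && pvIsSpace b && (c == Wtok)) && pvNoWSW (b :: c :: r)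
  | _ => true

theorem pvNoWSW_of_cond : ∀ (t : List String), (∀ j, pvCond t j = false) → pvNoWSW t = true := by
  intro t
  induction t with
  | nil => intro _; rfl
  | cons a l ih =>
    intro h
    match l with
    | [] => rfl
    | [b] => rfl
    | b :: c :: r =>
      have h0 := h 0
      unfold pvCond at h0
      simp only [List.getD_cons_zero, List.getD_cons_succ] at h0
      have htail : pvNoWSW (b :: c :: r) = true := by
        apply ih
        intro j
        have := h (j + 1)
        rwa [pvCond_cons] at this
      show (!((a == Wtok) && pvIsSpace b && (c == Wtok)) && pvNoWSW (b :: c :: r)) = true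
      rw [Bool.and_eq_true]
      exact ⟨by simp [h0], htail⟩

theorem pvNoWSW_cons_ne (a : String) (l : List String) (ha : (a == Wtok) = false)
    (h : pvNoWSW l = true) : pvNoWSW (a :: l) = true := by
  match l with
  | [] => rfl
  | [b] => rfl
  | b :: c :: r =>
    show (!((a == Wtok) && pvIsSpace b && (c == Wtok)) && pvNoWSW (b :: c :: r)) = true
    rw [Bool.and_eq_true]
    exact ⟨by simp [ha], h⟩

-- scanning invariant: prev2 = c, prev1 = b, suffix t is free of pair/triple patterns
def pvGood : String → String → List String → Bool
  | _, _, [] => true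
  | c, b, tok :: r =>
    !((b == Wtok) && (tok == Wtok)) &&
    !((c == Wtok) && pvIsSpace b && (tok == Wtok)) &&
    pvGood b tok r

theorem pvGood_of : ∀ (t : List String) (b c : String),
    pvHasWW (b :: t) = false → pvNoWSW (c :: b :: t) = true → pvGood c b t = true := by
  intro t
  induction t with
  | nil => intro b c _ _; rfl
  | cons tok r ih =>
    intro b c hww hwsw
    have hww' : (((b == Wtok) && (tok == Wtok)) || pvHasWW (tok :: r)) = false := hww
    have hwsw' : (!((c == Wtok) && pvIsSpace b && (tok == Wtok)) && pvNoWSW (b :: tok :: r)) = true := hwsw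
    rw [Bool.or_eq_false_iff] at hww'
    rw [Bool.and_eq_true] at hwsw'
    show (!((b == Wtok) && (tok == Wtok)) &&
          !((c == Wtok) && pvIsSpace b && (tok == Wtok)) &&
          pvGood b tok r) = true
    rw [Bool.and_eq_true, Bool.and_eq_true]
    exact ⟨⟨by simp [hww'.1], hwsw'.1⟩, ih tok b hww'.2 hwsw'.2⟩

-- on a pattern-free suffix the scan is the identity
theorem pvFoldl_id_of_good : ∀ (t : List String) (st : List String),
    pvGood (st.tail.headD "") (st.headD "") t = true →
    List.foldl pvStep st t = t.reverse ++ st := by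
  intro t
  induction t with
  | nil => intro st _; simp
  | cons tok r ih =>
    intro st hg
    have hg' : (!((st.headD "" == Wtok) && (tok == Wtok)) &&
        !((st.tail.headD "" == Wtok) && pvIsSpace (st.headD "") && (tok == Wtok)) &&
        pvGood (st.headD "") tok r) = true := hg
    rw [Bool.and_eq_true, Bool.and_eq_true] at hg'
    obtain ⟨⟨g1, g2⟩, g3⟩ := hg'
    have hstep : pvStep st tok = tok :: st := by
      by_cases htok : tok = Wtok
      · subst htok
        rcases st with _ | ⟨b0, _ | ⟨c0, r0⟩⟩
        · rfl
        · have hb : ¬ b0 = Wtok := by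
            simp only [List.headD_cons] at g1
            simpa [Wtok] using g1
          simp [pvStep, hb]
        · have hb : ¬ b0 = Wtok := by
            simp only [List.headD_cons] at g1
            simpa [Wtok] using g1
          have hcnd : (pvIsSpace b0 && (c0 == Wtok)) = false := by
            simp only [List.headD_cons, List.tail_cons] at g2
            cases hsp : pvIsSpace b0
            · simp
            · cases hc0 : (c0 == Wtok)
              · simp
              · exfalso
                simp [hsp, hc0] at g2
          simp [pvStep, hb, hcnd]
      · simp [pvStep, htok]
    rw [List.foldl_cons, hstep, ih (tok :: st) g3]
    simp

-- the loop's measure is positive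
theorem pvMeasure_pos (t : List String) : 1 ≤ t.length + (if pvHasWW t then 0 else 1) := by
  cases t with
  | nil => simp [pvHasWW]
  | cons a r => simp only [List.length_cons]; omega

-- headD of the collapse output is the original head
theorem pvCollapse_headD (t : List String) : (pvCollapse t).headD "" = t.headD "" := by
  cases t with
  | nil => rw [pvCollapse]
  | cons a r =>
    rw [pvCollapse]
    by_cases ha : a = Wtok <;> simp [ha]

-- headD after dropWhile never equals the dropped value (default "" assumed distinct)
theorem pvDropWhile_headD (l : List String) (a : String) (ha : a ≠ "") :
    (l.dropWhile (· == a)).headD "" ≠ a := by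
  induction l with
  | nil =>
    simp only [List.dropWhile_nil, List.headD_nil]
    exact fun h => ha h.symm
  | cons x xs ih =>
    rw [List.dropWhile_cons]
    by_cases hx : (x == a) = true
    · rw [if_pos hx]; exact ih
    · rw [if_neg hx]
      simp only [List.headD_cons]
      intro he
      exact hx (by simp [he])

-- the collapse output never contains two adjacent wildcards
theorem pvHasWW_collapse : ∀ (t : List String), pvHasWW (pvCollapse t) = false := by
  intro t
  induction t using pvCollapse.induct with
  | case1 => rw [pvCollapse]; rfl
  | case2 a r ih =>
    rw [pvCollapse]
    by_cases ha : a = Wtok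
    · subst ha
      rw [if_pos rfl, List.singleton_append, pvHasWW_cons]
      have hhd : ((pvCollapse (r.dropWhile (· == Wtok))).headD "" == Wtok) = false := by
        rw [pvCollapse_headD]
        exact beq_eq_false_iff_ne.mpr (pvDropWhile_headD r Wtok (by decide))
      rw [hhd, ih]
      simp
    · rw [if_neg ha, pvHasWW_append_of_ne _ _ ?hne]
      · exact ih
      case hne =>
        intro x hx
        rcases List.mem_cons.mp hx with h | h
        · exact h ▸ ha
        · have hxa : x = a := by simpa using List.mem_takeWhile_imp h
          exact hxa ▸ ha

-- the core equality: A's fixed-point loop computes B's single-pass scan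
theorem pvLoop_eq_aux : ∀ (n : Nat) (t : List String),
    t.length + (if pvHasWW t then 0 else 1) ≤ n →
    pvLoop t = (List.foldl pvStep [] t).reverse := by
  intro n
  induction n with
  | zero => intro t h; exact absurd h (by have := pvMeasure_pos t; omega)
  | succ n ih =>
    intro t hn
    rw [pvLoop]
    by_cases h : (pvRepGo (pvCollapse t) 0 ((pvCollapse t).length - 2) false).2 = true
    · rw [if_pos h]
      have h1 : pvHasWW (pvRepGo (pvCollapse t) 0 ((pvCollapse t).length - 2) false).1 = true :=
        pvRepGo_hasWW _ _ _ _ (by simp) h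
      have h2 := pvRepGo_length ((pvCollapse t).length - 2) (pvCollapse t) 0 false
      have h3 := pvCollapse_length_le t
      have hlt : (pvRepGo (pvCollapse t) 0 ((pvCollapse t).length - 2) false).1.length +
          (if pvHasWW (pvRepGo (pvCollapse t) 0 ((pvCollapse t).length - 2) false).1 then 0 else 1) ≤ n := by
        rw [if_pos h1]
        by_cases hW : pvHasWW t = true
        · rw [if_pos hW] at hn
          have := pvCollapse_length_lt t hW
          omega
        · rw [if_neg hW] at hn
          omega
      rw [ih _ hlt]
      congr 1
      rw [pvFoldl_repGo, pvFoldl_collapse]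
    · rw [if_neg h]
      have hfl : (pvRepGo (pvCollapse t) 0 ((pvCollapse t).length - 2) false).2 = false := by
        revert h; cases (pvRepGo (pvCollapse t) 0 ((pvCollapse t).length - 2) false).2 <;> simp
      rw [pvRepGo_nofire_eq _ _ _ hfl]
      have hcond : ∀ j, pvCond (pvCollapse t) j = false := by
        intro j
        by_cases hj : j < (pvCollapse t).length - 2
        · have := pvRepGo_nofire_cond _ _ _ hfl j hj
          simpa using this
        · exact pvCond_ge _ _ (by omega)
      have hww := pvHasWW_collapse t
      have hwsw := pvNoWSW_of_cond _ hcond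
      have hgood : pvGood "" "" (pvCollapse t) = true := by
        apply pvGood_of
        · rw [pvHasWW_cons]
          simp [hww, Wtok]
        · apply pvNoWSW_cons_ne _ _ (by decide)
          apply pvNoWSW_cons_ne _ _ (by decide)
          exact hwsw
      have hid : List.foldl pvStep [] (pvCollapse t) = (pvCollapse t).reverse ++ [] :=
        pvFoldl_id_of_good (pvCollapse t) [] hgood
      rw [← pvFoldl_collapse t, hid]
      simp

theorem pvLoop_eq (t : List String) : pvLoop t = (List.foldl pvStep [] t).reverse :=
  pvLoop_eq_aux _ t le_rfl

-- ===== VERDICT (by name: the statement is the Claim_ definition above) =====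
theorem normalize_regex_spec : Claim_equal_normalize_regex := by
  intro tokens _
  unfold Spec_normalize_regex normalize_regex normalize_regex_alt
  exact congrArg (PySem.Str.join "") (pvLoop_eq tokens)
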